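-- pv_equiv track=rewrite | github.com/Lim-Sung-Jun/dataStructure_algorithm | brute_force/brute_force.py | solution
-- ===== SOURCE A (Python) =====
-- def solution(answers):
--
--     answer = []
--     score = [0,0,0]
--
--     student1 = [1,2,3,4,5]
--     student2 = [2,1,2,3,2,4,2,5]
--     student3 = [3,3,1,1,2,2,4,4,5,5]
--
--     for i in range(len(answers)) :
--         if answers[i] == student1[i%5] :
--             score[0] += 1
--         if answers[i] == student2[i%8] :
--             score[1] += 1
--         if answers[i] == student3[i%10] :
--             score[2] += 1
--
--     for idx, num in enumerate(score) :
--         if num == max(score) :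
--             answer.append(idx +1)
--
--     return answer
-- ===== SOURCE B (Python) =====
-- def solution(answers):
--     patterns = [[1, 2, 3, 4, 5],
--                 [2, 1, 2, 3, 2, 4, 2, 5],
--                 [3, 3, 1, 1, 2, 2, 4, 4, 5, 5]]
--     # Frequency table keyed by (index mod 40, value); 40 = lcm of the pattern
--     # lengths, so each score is read off the table without rescanning answers.
--     cnt = {}
--     for i, a in enumerate(answers):
--         key = (i % 40, a)
--         cnt[key] = cnt.get(key, 0) + 1
--     scores = [sum(cnt.get((r, p[r % len(p)]), 0) for r in range(40))
--               for p in patterns]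
--     best = max(scores)
--     return [i + 1 for i, s in enumerate(scores) if s == best]
-- ===== Notes on version B (the rewrite author's own statement) =====
-- stated objective: alternative
-- what changed: Instead of comparing every answer against the three patterns as A does, B builds one frequency table keyed by (index mod 40, value) in a single pass (40 = lcm of the pattern lengths) and then reads each student's score off the 40-entry table as a sum of lookups, without rescanning answers or doing per-element pattern comparisons.
import Mathlib
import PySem

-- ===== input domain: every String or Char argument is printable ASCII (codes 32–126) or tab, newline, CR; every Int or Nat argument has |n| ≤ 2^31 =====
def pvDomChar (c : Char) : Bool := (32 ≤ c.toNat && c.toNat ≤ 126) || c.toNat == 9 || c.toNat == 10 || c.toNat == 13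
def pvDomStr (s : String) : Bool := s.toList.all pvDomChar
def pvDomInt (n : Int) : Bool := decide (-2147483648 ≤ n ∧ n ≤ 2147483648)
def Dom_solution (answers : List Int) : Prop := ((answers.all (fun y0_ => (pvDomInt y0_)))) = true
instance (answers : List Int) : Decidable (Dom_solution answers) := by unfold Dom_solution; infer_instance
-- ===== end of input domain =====

-- B replaces A's per-element pattern comparisons by a frequency table keyed by
-- (index mod 40, value) built in one pass, reading each score off the table (objective: alternative).

-- ===== PORT A =====
def solution (answers : List Int) : List Int :=
  let student1 : List Int := [1,2,3,4,5]
  let student2 : List Int := [2,1,2,3,2,4,2,5]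
  let student3 : List Int := [3,3,1,1,2,2,4,4,5,5]
  -- score = [0,0,0], mutated only at the fixed indices 0/1/2 → a triple accumulator
  let score : Int × Int × Int :=
    (PySem.List.pyRange 0 (PySem.List.len answers) 1).foldl (fun s i =>
      (if PySem.List.pyGetD answers i 0 == PySem.List.pyGetD student1 (PySem.Int.mod i 5) 0 then s.1 + 1 else s.1,
       if PySem.List.pyGetD answers i 0 == PySem.List.pyGetD student2 (PySem.Int.mod i 8) 0 then s.2.1 + 1 else s.2.1,
       if PySem.List.pyGetD answers i 0 == PySem.List.pyGetD student3 (PySem.Int.mod i 10) 0 then s.2.2 + 1 else s.2.2))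
      (0, 0, 0)
  -- for idx, num in enumerate(score): if num == max(score): answer.append(idx + 1)
  ([((0:Int), score.1), (1, score.2.1), (2, score.2.2)]).foldl
    (fun (acc : List Int) p =>
      if p.2 == (PySem.List.max? [score.1, score.2.1, score.2.2] (fun x => x)).getD 0
      then acc ++ [p.1 + 1] else acc) []

-- ===== PORT B =====
def solution_alt (answers : List Int) : List Int :=
  let patterns : List (List Int) :=
    [[1,2,3,4,5], [2,1,2,3,2,4,2,5], [3,3,1,1,2,2,4,4,5,5]]
  -- cnt[key] = cnt.get(key, 0) + 1 over key = (i % 40, a)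
  let cnt : PySem.Dict (Int × Int) Int :=
    (PySem.List.enumerate answers 0).foldl
      (fun d q => d.insert (PySem.Int.mod q.1 40, q.2)
                           (d.getD (PySem.Int.mod q.1 40, q.2) 0 + 1))
      PySem.Dict.empty
  -- scores = [sum(cnt.get((r, p[r % len(p)]), 0) for r in range(40)) for p in patterns]
  let scores : List Int := patterns.map (fun p =>
    ((PySem.List.pyRange 0 40 1).map
      (fun r => cnt.getD (r, PySem.List.pyGetD p (PySem.Int.mod r (PySem.List.len p)) 0) 0)).sum)
  let best : Int := (PySem.List.max? scores (fun x => x)).getD 0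
  ((PySem.List.enumerate scores 0).filter (fun q => q.2 == best)).map (fun q => q.1 + 1)

-- ===== PRECONDITION & SPEC =====
def Spec_solution (answers : List Int) (out : List Int) : Prop := out = solution_alt answers
instance (answers : List Int) (out : List Int) : Decidable (Spec_solution answers out) := by unfold Spec_solution; infer_instance

-- ===== CLAIM =====
def Claim_equal_solution : Prop := ∀ (answers : List Int), Dom_solution answers → Spec_solution answers (solution answers)

-- ===== LEMMAS AND PROOFS =====

-- Σ over a list of (f + g) splits
theorem sum_map_split (l : List Int) (f g : Int → Nat) :
    (l.map (fun x => f x + g x)).sum = (l.map f).sum + (l.map g).sum := by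
  induction l with
  | nil => simp
  | cons x t ih => simp [ih]; omega

-- a key absent from rs contributes nothing
theorem sum_ind_zero (g : Int → Int) (y : Int × Int) (rs : List Int) (h : y.1 ∉ rs) :
    (rs.map (fun r => if (y == (r, g r)) then 1 else 0)).sum = 0 := by
  induction rs with
  | nil => simp
  | cons r t ih =>
    have h1 : y.1 ≠ r := fun e => h (by simp [e])
    have h2 : y.1 ∉ t := fun e => h (List.mem_cons_of_mem _ e)
    have hf : (y == (r, g r)) = false := by
      cases y with
      | mk a b => simp_all [Prod.ext_iff]
    rw [List.map_cons, List.sum_cons, hf]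
    simpa using ih h2

-- a key present exactly once contributes its indicator
theorem sum_ind_one (g : Int → Int) (y : Int × Int) (rs : List Int)
    (hnd : rs.Nodup) (hm : y.1 ∈ rs) :
    (rs.map (fun r => if (y == (r, g r)) then 1 else 0)).sum
      = (if (y.2 == g y.1) then 1 else 0) := by
  induction rs with
  | nil => simp at hm
  | cons r t ih =>
    rcases List.mem_cons.1 hm with e | hmem
    · have hnt : y.1 ∉ t := by rw [e]; exact (List.nodup_cons.1 hnd).1
      have he : (y == (r, g r)) = (y.2 == g y.1) := by
        cases y with
        | mk a b =>
          simp only at e; subst e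
          simp [Prod.ext_iff]
      rw [List.map_cons, List.sum_cons, he, sum_ind_zero g y t hnt]
      omega
    · have h1 : y.1 ≠ r := fun e => (List.nodup_cons.1 hnd).1 (e ▸ hmem)
      have hf : (y == (r, g r)) = false := by
        cases y with
        | mk a b => simp_all [Prod.ext_iff]
      rw [List.map_cons, List.sum_cons, hf, ih (List.nodup_cons.1 hnd).2 hmem]
      simp

-- sum of counts over a nodup key list = countP
theorem sum_count_eq_countP (g : Int → Int) (rs : List Int) (hnd : rs.Nodup)
    (ys : List (Int × Int)) (h : ∀ y ∈ ys, y.1 ∈ rs) :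
    (rs.map (fun r => ys.count (r, g r))).sum = ys.countP (fun q => q.2 == g q.1) := by
  induction ys with
  | nil => simp
  | cons y t ih =>
    have hy : y.1 ∈ rs := h y (List.mem_cons_self)
    have ht : ∀ z ∈ t, z.1 ∈ rs := fun z hz => h z (List.mem_cons_of_mem _ hz)
    have hcnt : ∀ r : Int, (y :: t).count (r, g r)
        = t.count (r, g r) + (if (y == (r, g r)) then 1 else 0) := by
      intro r; rw [List.count_cons]
    calc (rs.map (fun r => (y :: t).count (r, g r))).sum
        = (rs.map (fun r => t.count (r, g r) + (if (y == (r, g r)) then 1 else 0))).sum := by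
          exact congrArg List.sum (List.map_congr_left (fun r _ => hcnt r))
      _ = (rs.map (fun r => t.count (r, g r))).sum
          + (rs.map (fun r => if (y == (r, g r)) then 1 else 0)).sum := sum_map_split rs _ _
      _ = t.countP (fun q => q.2 == g q.1) + (if (y.2 == g y.1) then 1 else 0) := by
          rw [ih ht, sum_ind_one g y rs hnd hy]
      _ = (y :: t).countP (fun q => q.2 == g q.1) := by
          rw [List.countP_cons]

-- B's table read for a pattern p equals A's counting loop over the index range
theorem score_eq (answers : List Int) (p : List Int) (L : Int)
    (hpos : 0 < L) (hdvd : L ∣ 40) :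
    ((PySem.List.pyRange 0 40 1).map
      (fun r => ((PySem.List.enumerate answers 0).foldl
          (fun (d : PySem.Dict (Int × Int) Int) q => d.insert (PySem.Int.mod q.1 40, q.2)
                               (d.getD (PySem.Int.mod q.1 40, q.2) 0 + 1))
          PySem.Dict.empty).getD (r, PySem.List.pyGetD p (PySem.Int.mod r L) 0) 0)).sum
    = (PySem.List.pyRange 0 (PySem.List.len answers) 1).foldl
        (fun acc i => if PySem.List.pyGetD answers i 0 == PySem.List.pyGetD p (PySem.Int.mod i L) 0 then acc + 1 else acc) 0 := by
  -- turn the dict fold into a fold over the mapped key list, then getD into count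
  have hmap : (PySem.List.enumerate answers 0).foldl
      (fun (d : PySem.Dict (Int × Int) Int) q => d.insert (PySem.Int.mod q.1 40, q.2)
                           (d.getD (PySem.Int.mod q.1 40, q.2) 0 + 1))
      PySem.Dict.empty
    = ((PySem.List.enumerate answers 0).map (fun q => (PySem.Int.mod q.1 40, q.2))).foldl
      (fun (d : PySem.Dict (Int × Int) Int) x => d.insert x (d.getD x 0 + 1)) PySem.Dict.empty := by
    rw [List.foldl_map]
  rw [hmap]
  set ys := (PySem.List.enumerate answers 0).map (fun q => (PySem.Int.mod q.1 40, q.2)) with hys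
  have hget : ∀ r : Int, ((ys.foldl (fun (d : PySem.Dict (Int × Int) Int) x => d.insert x (d.getD x 0 + 1)) PySem.Dict.empty).getD
        (r, PySem.List.pyGetD p (PySem.Int.mod r L) 0) 0)
      = (ys.count (r, PySem.List.pyGetD p (PySem.Int.mod r L) 0) : Int) := by
    intro r
    rw [PySem.Dict.getD_foldl_insert_add_one]
    simp [PySem.Dict.getD_empty]
  simp only [hget]
  -- key membership: every ys key is in pyRange 0 40 1
  have hmem : ∀ y ∈ ys, y.1 ∈ PySem.List.pyRange 0 40 1 := by
    intro y hy
    rw [hys] at hy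
    rcases List.mem_map.1 hy with ⟨q, hq, rfl⟩
    rcases (PySem.List.mem_enumerate_iff _ _ _).1 hq with ⟨k, hk, rfl⟩
    simp only
    rw [PySem.List.mem_pyRange_iff_of_pos (by norm_num)]
    have : PySem.Int.mod ((0:Int) + k) 40 = ((0:Int) + k) % 40 :=
      PySem.Int.mod_eq_emod_of_pos (by norm_num)
    rw [this]
    constructor
    · exact Int.emod_nonneg _ (by norm_num)
    · refine ⟨by omega, ?_⟩
      have := Int.emod_lt_of_pos ((0:Int) + k) (show (0:Int) < 40 by norm_num)
      omega
  have hnd : (PySem.List.pyRange 0 40 1).Nodup := by decide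
  -- sum of Nat counts cast to Int
  have hsum := sum_count_eq_countP (fun r => PySem.List.pyGetD p (PySem.Int.mod r L) 0)
      (PySem.List.pyRange 0 40 1) hnd ys hmem
  have hcast : ((PySem.List.pyRange 0 40 1).map
      (fun r => (ys.count (r, PySem.List.pyGetD p (PySem.Int.mod r L) 0) : Int))).sum
    = ((ys.countP (fun q => q.2 == PySem.List.pyGetD p (PySem.Int.mod q.1 L) 0) : Nat) : Int) := by
    rw [← hsum]
    induction (PySem.List.pyRange 0 40 1) with
    | nil => simp
    | cons r t ih => simp [ih]
  rw [hcast]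
  -- countP over ys = countP over the index range
  rw [hys, List.countP_map]
  have hpred : ∀ q ∈ PySem.List.enumerate answers 0,
      ((fun q : Int × Int => q.2 == PySem.List.pyGetD p (PySem.Int.mod q.1 L) 0) ∘
        (fun q : Int × Int => (PySem.Int.mod q.1 40, q.2))) q
      = (q.2 == PySem.List.pyGetD p (PySem.Int.mod q.1 L) 0) := by
    intro q hq
    rcases (PySem.List.mem_enumerate_iff _ _ _).1 hq with ⟨k, hk, rfl⟩
    simp only [Function.comp]
    have h40 : PySem.Int.mod ((0:Int) + k) 40 = ((0:Int) + k) % 40 :=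
      PySem.Int.mod_eq_emod_of_pos (by norm_num)
    have hLa : PySem.Int.mod (PySem.Int.mod ((0:Int) + k) 40) L
        = PySem.Int.mod ((0:Int) + k) L := by
      rw [h40, PySem.Int.mod_eq_emod_of_pos hpos, PySem.Int.mod_eq_emod_of_pos hpos,
          Int.emod_emod_of_dvd _ hdvd]
    rw [hLa]
  have hcp : (PySem.List.enumerate answers 0).countP
      ((fun q : Int × Int => q.2 == PySem.List.pyGetD p (PySem.Int.mod q.1 L) 0) ∘
        (fun q : Int × Int => (PySem.Int.mod q.1 40, q.2)))
    = (PySem.List.enumerate answers 0).countP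
      (fun q : Int × Int => q.2 == PySem.List.pyGetD p (PySem.Int.mod q.1 L) 0) :=
    List.countP_congr (fun q hq => by rw [hpred q hq])
  rw [hcp]
  -- enumerate → pyRange on the A side
  rw [PySem.List.enumerate_eq_map_pyRange (d := 0), List.countP_map]
  rw [PySem.List.foldl_if_add_one]
  simp [Function.comp_def]

-- the final selection agrees once the three scores agree
theorem select_eq (s1 s2 s3 : Int) :
    ([((0:Int), s1), (1, s2), (2, s3)]).foldl
      (fun (acc : List Int) p =>
        if p.2 == (PySem.List.max? [s1, s2, s3] (fun x => x)).getD 0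
        then acc ++ [p.1 + 1] else acc) []
    = ((PySem.List.enumerate [s1, s2, s3] 0).filter
        (fun q => q.2 == (PySem.List.max? [s1, s2, s3] (fun x => x)).getD 0)).map
        (fun q => q.1 + 1) := by
  simp only [PySem.List.enumerate_cons, PySem.List.enumerate_nil]
  by_cases h1 : s1 == (PySem.List.max? [s1, s2, s3] (fun x => x)).getD 0 <;>
  by_cases h2 : s2 == (PySem.List.max? [s1, s2, s3] (fun x => x)).getD 0 <;>
  by_cases h3 : s3 == (PySem.List.max? [s1, s2, s3] (fun x => x)).getD 0 <;>
    simp [List.foldl, List.filter, h1, h2, h3]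

theorem solution_eq (answers : List Int) : solution answers = solution_alt answers := by
  unfold solution solution_alt
  simp only [List.map_cons, List.map_nil]
  rw [PySem.List.foldl_prod_mk
        (f := fun a i => if PySem.List.pyGetD answers i 0 == PySem.List.pyGetD [1,2,3,4,5] (PySem.Int.mod i 5) 0 then a + 1 else a)
        (g := fun (t : Int × Int) i =>
          (if PySem.List.pyGetD answers i 0 == PySem.List.pyGetD [2,1,2,3,2,4,2,5] (PySem.Int.mod i 8) 0 then t.1 + 1 else t.1,
           if PySem.List.pyGetD answers i 0 == PySem.List.pyGetD [3,3,1,1,2,2,4,4,5,5] (PySem.Int.mod i 10) 0 then t.2 + 1 else t.2))]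
  rw [PySem.List.foldl_prod_mk
        (f := fun (a : Int) i => if PySem.List.pyGetD answers i 0 == PySem.List.pyGetD [2,1,2,3,2,4,2,5] (PySem.Int.mod i 8) 0 then a + 1 else a)
        (g := fun (a : Int) i => if PySem.List.pyGetD answers i 0 == PySem.List.pyGetD [3,3,1,1,2,2,4,4,5,5] (PySem.Int.mod i 10) 0 then a + 1 else a)]
  rw [← score_eq answers [1,2,3,4,5] 5 (by norm_num) (by norm_num),
      ← score_eq answers [2,1,2,3,2,4,2,5] 8 (by norm_num) (by norm_num),
      ← score_eq answers [3,3,1,1,2,2,4,4,5,5] 10 (by norm_num) (by norm_num)]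
  exact select_eq _ _ _

-- ===== VERDICT =====
theorem solution_spec : Claim_equal_solution := by
  intro answers _
  exact solution_eq answers
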